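-- pv_equiv track=rewrite | github.com/snotfear/talking_bot_with_GPT | GPT_interpretator.py | constuct_interpreter_contexts
-- ===== SOURCE A (Python) =====
-- def constuct_interpreter_contexts(messages):
--     contexts = set()
--     max_history = 2
--     messages2 = [m for m in messages]
--     for n in range(2, max_history+2): # несколько кругов для составления разных вариантов генерации интерпритаций
--         steps = []
--         for i, message in enumerate(messages2):
--             msg_text = message[2:] # Отсекаем букву с точкой говорящего (Ю. - юзер, Б. - бот)
--             prev_side = messages2[i-1][0] if i > 0 else ''
--             if prev_side != message[0]: # Проверка на последовательность реплик
--                 steps.append(msg_text) # Если реплика следующая реплика от второго участника диалога, то добавляем её в список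
--             else:
--                 s = steps[-1]
--                 if s[-1] not in '.?!;:': # А если две реплики идут подряд от одного пользователя (или бота), то сращиваем их в одну
--                     s += '.'
--                 steps[-1] = s + ' ' + msg_text
--         last_steps = steps[-n:]
--         context = ' | '.join(last_steps) # Разделяем стороны диалога чертой.
--         contexts.add(context)
--     return sorted(list(contexts), key=lambda s: -len(s))
-- ===== SOURCE B (Python) =====
-- PUNCT = '.?!;:'
--
-- def constuct_interpreter_contexts(messages):
--     # Scan the dialogue BACKWARDS, assembling only the last (up to) 3 merged
--     # steps and stopping as soon as they are complete: only steps[-3:] can ever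
--     # reach the output, so the rest of the history is never touched.
--     steps = []            # completed steps, most recent first
--     cur = None            # the open step, built right-to-left
--     side = None           # speaker of the open step
--     for m in reversed(messages):
--         t = m[2:]
--         if m[0] == side:
--             if t == '' or t[-1] not in PUNCT:
--                 t += '.'
--             cur = t + ' ' + cur
--         else:
--             if cur is not None:
--                 steps.append(cur)
--                 if len(steps) == 3:
--                     cur = None
--                     break
--             cur = t
--             side = m[0]
--     if cur is not None:
--         steps.append(cur)
--     steps.reverse()
--     c2 = ' | '.join(steps[-2:])
--     c3 = ' | '.join(steps)
--     return [c2] if c3 == c2 else [c3, c2]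
-- ===== Notes on version B (the rewrite author's own statement) =====
-- stated objective: faster
-- what changed: B traverses the messages BACKWARDS, building each merged step right-to-left (the splice operator is associative, so right-to-left merging gives the same steps) and stops as soon as the last 3 steps are complete, so long histories are never fully scanned; A instead makes two identical full forward merge passes and post-processes with a set and a sort, which B replaces by returning the two suffix joins directly in the only order their lengths permit.
import Mathlib
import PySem

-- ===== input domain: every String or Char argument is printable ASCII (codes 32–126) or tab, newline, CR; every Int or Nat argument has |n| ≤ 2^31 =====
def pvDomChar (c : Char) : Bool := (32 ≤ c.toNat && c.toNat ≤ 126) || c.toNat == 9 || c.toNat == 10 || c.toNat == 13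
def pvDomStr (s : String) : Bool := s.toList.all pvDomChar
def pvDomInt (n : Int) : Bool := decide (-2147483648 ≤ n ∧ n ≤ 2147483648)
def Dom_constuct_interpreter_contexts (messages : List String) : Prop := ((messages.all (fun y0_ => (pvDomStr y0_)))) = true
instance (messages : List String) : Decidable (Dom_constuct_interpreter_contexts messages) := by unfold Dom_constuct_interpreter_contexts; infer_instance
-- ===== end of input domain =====

-- B scans the dialogue backwards, assembling only the last (up to) 3 merged steps and
-- stopping as soon as they are complete, instead of A's two full forward merge passes
-- plus a set and a sort; equivalence of the RETURN value on Pre_.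

-- ===== PORT A =====
-- message[0], totalized (empty messages are outside Pre_)
def pvCharAt0 (m : String) : Char := (PySem.Str.pyGet? m 0).getD '\x00'

-- `messages2[i-1][0] if i > 0 else ''` (the '' case is `none`)
def pvPrevA (ms : List String) (i : Int) : Option Char :=
  if i > 0 then some (pvCharAt0 (PySem.List.pyGetD ms (i - 1) "")) else none

-- the body of A's inner `for i, message in enumerate(messages2)` loop
def pvStepA (ms : List String) (steps : List (List Char)) (p : Int × String) : List (List Char) :=
  let msg_text := PySem.List.slice p.2.toList (some 2) none
  let prev_side := pvPrevA ms p.1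
  if prev_side ≠ some (pvCharAt0 p.2) then
    steps ++ [msg_text]
  else
    let s := PySem.List.pyGetD steps (-1) []
    let s := if ((PySem.List.pyGet? s (-1)).getD '\x00') ∉ ".?!;:".toList then s ++ ['.'] else s
    PySem.List.pySetD steps (-1) (s ++ ' ' :: msg_text)

def constuct_interpreter_contexts (messages : List String) : List String :=
  let max_history : Int := 2
  let messages2 := messages.map (fun m => m)
  let contexts :=
    (PySem.List.pyRange 2 (max_history + 2) 1).foldl (fun (ctxs : PySem.Set (List Char)) n =>
      let steps := (PySem.List.enumerate messages2).foldl (pvStepA messages2) []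
      let last_steps := PySem.List.slice steps (some (-n)) none
      let context := PySem.Chars.join " | ".toList last_steps
      PySem.Set.add ctxs context) PySem.Set.empty
  (PySem.List.sorted contexts (fun s => -(PySem.List.len s))).map String.ofList

-- ===== PORT B =====
-- `if t == '' or t[-1] not in PUNCT: t += '.'` then `t + ' ' + cur`
def pvMergeTB (t cur : List Char) : List Char :=
  let t := if t = [] ∨ ((PySem.List.pyGet? t (-1)).getD '\x00') ∉ ".?!;:".toList then t ++ ['.'] else t
  t ++ ' ' :: cur

-- the `for m in reversed(messages)` loop with its early break (cur = None after the break)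
def pvBackB : List String → Option Char → Option (List Char) → List (List Char) → List (List Char)
  | [], _, cur, steps =>
    match cur with
    | some c => steps ++ [c]
    | none => steps
  | m :: rest, side, cur, steps =>
    let t := PySem.List.slice m.toList (some 2) none
    if some (pvCharAt0 m) = side then
      pvBackB rest side (some (pvMergeTB t (cur.getD []))) steps
    else
      match cur with
      | some c =>
        let steps' := steps ++ [c]
        if steps'.length = 3 then steps'
        else pvBackB rest (some (pvCharAt0 m)) (some t) steps'
      | none => pvBackB rest (some (pvCharAt0 m)) (some t) steps

def constuct_interpreter_contexts_alt (messages : List String) : List String :=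
  let steps := (pvBackB messages.reverse none none []).reverse
  let c2 := PySem.Chars.join " | ".toList (PySem.List.slice steps (some (-2)) none)
  let c3 := PySem.Chars.join " | ".toList steps
  if c3 = c2 then [String.ofList c2] else [String.ofList c3, String.ofList c2]

-- ===== PRECONDITION & SPEC =====
def pvHead (messages : List String) (j : Nat) : Option Char := (messages.getD j "").toList.head?

def pvNoEmptyMsg (messages : List String) : Prop := ∀ m ∈ messages, m ≠ ""

-- no message is merged (same leading char as its predecessor) into a step that is empty
-- because the predecessor opened a new step with no text (length ≤ 2)
def pvNoEmptyOpenMerge (messages : List String) : Prop :=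
  ∀ i : Fin messages.length, 1 ≤ i.val →
    pvHead messages i.val = pvHead messages (i.val - 1) →
    ¬((messages.getD (i.val - 1) "").length ≤ 2 ∧
      (i.val = 1 ∨ pvHead messages (i.val - 1) ≠ pvHead messages (i.val - 2)))

-- Pre_ excludes exactly the inputs on which A raises an IndexError: a message that is the
-- empty string (message[0]), or a merged message whose step is empty (s[-1]).
def Pre_constuct_interpreter_contexts (messages : List String) : Prop :=
  pvNoEmptyMsg messages ∧ pvNoEmptyOpenMerge messages
instance (messages : List String) : Decidable (Pre_constuct_interpreter_contexts messages) := by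
  unfold Pre_constuct_interpreter_contexts pvNoEmptyMsg pvNoEmptyOpenMerge; infer_instance

def pvWitness_constuct_interpreter_contexts : List String := ["U. hi", "B. yo", "B. ok"]

def Spec_constuct_interpreter_contexts (messages : List String) (out : List String) : Prop := out = constuct_interpreter_contexts_alt messages
instance (messages : List String) (out : List String) : Decidable (Spec_constuct_interpreter_contexts messages out) := by unfold Spec_constuct_interpreter_contexts; infer_instance

-- ===== CLAIM (what is proved, stated in full; the proofs are below) =====
def Claim_equal_constuct_interpreter_contexts : Prop := ∀ (messages : List String), Dom_constuct_interpreter_contexts messages → Pre_constuct_interpreter_contexts messages → Spec_constuct_interpreter_contexts messages (constuct_interpreter_contexts messages)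

-- ===== LEMMAS AND PROOFS =====

def pvText (m : String) : List Char := PySem.List.slice m.toList (some 2) none

-- the totalized "add '.' unless the last char is terminal punctuation"
def pvDot (s : List Char) : List Char :=
  if ((PySem.List.pyGet? s (-1)).getD '\x00') ∉ ".?!;:".toList then s ++ ['.'] else s

-- the merge of two adjacent same-speaker chunks; associative (pvOp_assoc below)
def pvOp (s t : List Char) : List Char := pvDot s ++ ' ' :: t

-- forward attachment of one more chunk (speaker h, text t) to a step list with last speaker σ
def pvAttach (st : List (List Char) × Option Char) (h : Char) (t : List Char) : List (List Char) :=
  if some h = st.2 then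
    match PySem.List.pop? st.1 with
    | none => st.1
    | some (last, rest) => rest ++ [pvOp last t]
  else st.1 ++ [t]

def pvFwd (st : List (List Char) × Option Char) (m : String) : List (List Char) × Option Char :=
  (pvAttach st (pvCharAt0 m) (pvText m), some (pvCharAt0 m))

-- B's backward scan without the break: ALL merged steps, most recent first
def pvRuns : List String → Option Char → Option (List Char) → List (List Char)
  | [], _, cur =>
    match cur with
    | some c => [c]
    | none => []
  | m :: rest, side, cur =>
    if some (pvCharAt0 m) = side then
      pvRuns rest side (some (pvOp (pvText m) (cur.getD [])))
    else
      match cur with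
      | some c => c :: pvRuns rest (some (pvCharAt0 m)) (some (pvText m))
      | none => pvRuns rest (some (pvCharAt0 m)) (some (pvText m))

lemma pvMergeTB_eq (t c : List Char) : pvMergeTB t c = pvOp t c := by
  rcases t with _ | ⟨x, xs⟩
  · simp [pvMergeTB, pvOp, pvDot, PySem.List.pyGet?, PySem.List.pyIdx?]
  · simp [pvMergeTB, pvOp, pvDot]

lemma pvDot_last {s : List Char} {x : Char} (h : PySem.List.pyGet? s (-1) = some x) :
    pvDot s = if x ∉ ".?!;:".toList then s ++ ['.'] else s := by
  unfold pvDot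
  rw [h]
  rfl

lemma pvDot_append_cons (a b : List Char) :
    pvDot (pvDot a ++ ' ' :: b) = pvDot a ++ ' ' :: pvDot b := by
  rcases b.eq_nil_or_concat with rfl | ⟨bs, x, rfl⟩
  · have hg : PySem.List.pyGet? (pvDot a ++ ' ' :: ([] : List Char)) (-1) = some ' ' :=
      PySem.List.pyGet?_neg_one_append_singleton (pvDot a) ' '
    rw [pvDot_last hg]
    have hnil : pvDot ([] : List Char) = ['.'] := by decide
    rw [hnil, if_pos (by decide)]
    simp
  · simp only [List.concat_eq_append]
    have hg : PySem.List.pyGet? (pvDot a ++ ' ' :: (bs ++ [x])) (-1) = some x := by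
      have he : pvDot a ++ ' ' :: (bs ++ [x]) = (pvDot a ++ ' ' :: bs) ++ [x] := by simp
      rw [he]
      exact PySem.List.pyGet?_neg_one_append_singleton _ _
    have hgb : PySem.List.pyGet? (bs ++ [x]) (-1) = some x :=
      PySem.List.pyGet?_neg_one_append_singleton bs x
    rw [pvDot_last hg, pvDot_last hgb]
    by_cases hx : x ∉ ".?!;:".toList
    · rw [if_pos hx, if_pos hx]
      simp
    · rw [if_neg hx, if_neg hx]

lemma pvOp_assoc (a b c : List Char) : pvOp (pvOp a b) c = pvOp a (pvOp b c) := by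
  unfold pvOp
  rw [pvDot_append_cons]
  simp

-- the two step functions agree (A's index-computed previous speaker = B's tracked one)
lemma pv_step_eq (ms : List String) (steps : List (List Char)) (k : Int) (m : String) :
    pvStepA ms steps (k, m) = (pvFwd (steps, pvPrevA ms k) m).1 := by
  by_cases h : pvPrevA ms k = some (pvCharAt0 m)
  · rcases steps.eq_nil_or_concat with rfl | ⟨t0, x, hx⟩
    · unfold pvStepA pvFwd pvAttach pvText
      rw [h]
      simp [PySem.List.pySetD, PySem.List.pySet?, PySem.List.pyIdx?, PySem.List.pop?,
        PySem.List.pyGetD]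
    · rw [hx, List.concat_eq_append]
      unfold pvStepA pvFwd pvAttach pvOp pvDot pvText
      rw [h]
      simp [PySem.List.pop?_last, PySem.List.pyGetD_neg_one_append_singleton,
        PySem.List.pySetD, PySem.List.pySet?, PySem.List.pyIdx?]
  · have h' : ¬ (some (pvCharAt0 m) = pvPrevA ms k) := fun hh => h hh.symm
    simp [pvStepA, pvFwd, pvAttach, pvText, h, h']

-- the whole A-loop equals the forward fold with the tracked previous speaker
lemma pv_fold_eq (ms : List String) :
    ∀ (rest : List String) (k : Nat) (steps : List (List Char)),
      ms.drop k = rest →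
      (PySem.List.enumerate rest (k : Int)).foldl (pvStepA ms) steps
        = (rest.foldl pvFwd (steps, pvPrevA ms k)).1 := by
  intro rest
  induction rest with
  | nil => intro k steps _; simp [PySem.List.enumerate]
  | cons m rest' ih =>
    intro k steps hdrop
    have hk : ms[k]? = some m := by
      rw [← List.head?_drop, hdrop]; rfl
    have hnext : pvPrevA ms ((k + 1 : Nat) : Int) = some (pvCharAt0 m) := by
      simp [pvPrevA, List.getD_eq_getElem?_getD, hk]
    have hdrop' : ms.drop (k + 1) = rest' := by
      have h1 : ms.drop (k + 1) = (ms.drop k).drop 1 := by rw [List.drop_drop]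
      rw [h1, hdrop]; rfl
    rw [PySem.List.enumerate_cons]
    simp only [List.foldl_cons]
    rw [pv_step_eq]
    have hcast : ((k : Nat) : Int) + 1 = (((k + 1 : Nat)) : Int) := by push_cast; ring
    rw [hcast, ih (k + 1) _ hdrop']
    have hB : pvFwd (steps, pvPrevA ms k) m
        = ((pvFwd (steps, pvPrevA ms k) m).1, pvPrevA ms ((k + 1 : Nat) : Int)) := by
      rw [hnext]; rfl
    rw [← hB]

-- a forward fold never empties a nonempty step list
lemma pv_foldl_ne_nil (ms : List String) :
    ∀ (st : List (List Char) × Option Char), st.1 ≠ [] → (ms.foldl pvFwd st).1 ≠ [] := by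
  induction ms with
  | nil => intro st h; simpa using h
  | cons m rest ih =>
    intro st h
    simp only [List.foldl_cons]
    apply ih
    unfold pvFwd pvAttach
    rcases st.1.eq_nil_or_concat with hnil | ⟨t, x, hx⟩
    · exact absurd hnil h
    · rw [hx, List.concat_eq_append]
      split_ifs
      · rw [PySem.List.pop?_last]; simp
      · simp

-- B's break is a truncation of the break-free backward scan
lemma pvRuns_take :
    ∀ (rs : List String) (σ : Option Char) (cur : Option (List Char)) (steps : List (List Char)),
      steps.length < 3 →
      pvBackB rs σ cur steps = steps ++ (pvRuns rs σ cur).take (3 - steps.length) := by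
  intro rs
  induction rs with
  | nil =>
    intro σ cur steps hlen
    rcases cur with _ | c
    · simp [pvBackB, pvRuns]
    · have h2 : pvRuns [] σ (some c) = [c] := rfl
      have h3 : pvBackB [] σ (some c) steps = steps ++ [c] := rfl
      rw [h2, h3, List.take_of_length_le (by simp; omega)]
  | cons m rest ih =>
    intro σ cur steps hlen
    by_cases hc : some (pvCharAt0 m) = σ
    · simp only [pvBackB, pvRuns, if_pos hc]
      rw [pvMergeTB_eq]
      have ht : PySem.List.slice m.toList (some 2) none = pvText m := rfl
      rw [ht]
      exact ih σ _ steps hlen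
    · have ht : PySem.List.slice m.toList (some 2) none = pvText m := rfl
      rcases cur with _ | c
      · simp only [pvBackB, pvRuns, if_neg hc]
        rw [ht]
        exact ih _ _ steps hlen
      · by_cases h3 : (steps ++ [c]).length = 3
        · have h1 : 3 - steps.length = 1 := by simp at h3; omega
          simp only [pvBackB, pvRuns, if_neg hc, if_pos h3, h1, List.take_succ_cons,
            List.take_zero]
        · have hlen2 : (steps ++ [c]).length < 3 := by simp at h3 ⊢; omega
          have h1 : 3 - steps.length = (3 - (steps ++ [c]).length) + 1 := by
            simp at h3 ⊢; omega
          simp only [pvBackB, pvRuns, if_neg hc, if_neg h3]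
          rw [ht, ih _ _ _ hlen2, h1, List.take_succ_cons]
          simp

-- the break-free backward scan is the reverse of the forward fold
lemma pv_main :
    ∀ (ms : List String) (h : Char) (t : List Char),
      pvRuns ms.reverse (some h) (some t)
        = (pvAttach (ms.foldl pvFwd ([], none)) h t).reverse := by
  intro ms
  induction ms using List.reverseRecOn with
  | nil =>
    intro h t
    simp [pvRuns, pvAttach]
  | append_singleton ys m ih =>
    intro h t
    rw [List.reverse_append]
    simp only [List.reverse_singleton, List.singleton_append]
    rw [List.foldl_append]
    simp only [List.foldl_cons, List.foldl_nil]
    set st := ys.foldl pvFwd ([], none) with hst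
    by_cases hc : pvCharAt0 m = h
    · -- m continues the pending run
      subst hc
      simp only [pvRuns, if_true, Option.getD_some]
      rw [ih (pvCharAt0 m) (pvOp (pvText m) t)]
      unfold pvFwd
      by_cases hσ : st.2 = some (pvCharAt0 m)
      · -- same speaker just before m: associativity
        have hne : st.1 ≠ [] := by
          rcases ys with _ | ⟨y, ys'⟩
          · rw [hst] at hσ; simp at hσ
          · rw [hst]
            simp only [List.foldl_cons]
            apply pv_foldl_ne_nil
            simp [pvFwd, pvAttach]
        rcases st.1.eq_nil_or_concat with h0 | ⟨zs, z, hz⟩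
        · exact absurd h0 hne
        · rw [List.concat_eq_append] at hz
          have hAm : pvAttach st (pvCharAt0 m) (pvText m) = zs ++ [pvOp z (pvText m)] := by
            unfold pvAttach
            rw [if_pos hσ.symm, hz, PySem.List.pop?_last]
          have hA1 : pvAttach st (pvCharAt0 m) (pvOp (pvText m) t)
              = zs ++ [pvOp z (pvOp (pvText m) t)] := by
            unfold pvAttach
            rw [if_pos hσ.symm, hz, PySem.List.pop?_last]
          rw [hA1, hAm]
          unfold pvAttach
          rw [if_pos rfl]
          simp only [PySem.List.pop?_last]
          rw [pvOp_assoc]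
      · -- speaker change just before m
        have hA1 : pvAttach st (pvCharAt0 m) (pvOp (pvText m) t)
            = st.1 ++ [pvOp (pvText m) t] := by
          unfold pvAttach
          rw [if_neg (fun hh => hσ hh.symm)]
        have hAm : pvAttach st (pvCharAt0 m) (pvText m) = st.1 ++ [pvText m] := by
          unfold pvAttach
          rw [if_neg (fun hh => hσ hh.symm)]
        rw [hA1, hAm]
        unfold pvAttach
        rw [if_pos rfl]
        simp only [PySem.List.pop?_last]
    · -- m does not continue the pending run: it closes it
      have hcond : ¬ (some (pvCharAt0 m) = (some h : Option Char)) := by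
        intro hh; exact hc (by injection hh)
      simp only [pvRuns, if_neg hcond]
      rw [ih (pvCharAt0 m) (pvText m)]
      unfold pvFwd
      have hA2 : pvAttach (pvAttach st (pvCharAt0 m) (pvText m), some (pvCharAt0 m)) h t
          = pvAttach st (pvCharAt0 m) (pvText m) ++ [t] := by
        unfold pvAttach
        rw [if_neg (by intro hh; exact hc (by injection hh with h2; exact h2.symm))]
      rw [hA2]
      simp

-- reversed take-3 of a reversed list is the 3-suffix
lemma pv_take_rev {α : Type} (l : List α) (n : Nat) :
    (l.reverse.take n).reverse = l.drop (l.length - n) := by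
  rcases Nat.le_total n l.length with h | h
  · rw [List.take_reverse]
    · simp
  · have h1 : l.reverse.take n = l.reverse := List.take_of_length_le (by simpa using h)
    have h2 : l.length - n = 0 := by omega
    rw [h1, h2]
    simp

-- suffix joins: equal when the list is short, otherwise the 3-suffix is strictly longer
lemma pv_sfx (steps : List (List Char)) :
    (PySem.Chars.join " | ".toList (steps.drop (steps.length - 3))
      = PySem.Chars.join " | ".toList (steps.drop (steps.length - 2)))
    ∨ (PySem.Chars.join " | ".toList (steps.drop (steps.length - 2))).length
      < (PySem.Chars.join " | ".toList (steps.drop (steps.length - 3))).length := by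
  by_cases h3 : 3 ≤ steps.length
  · right
    have hlt : steps.length - 3 < steps.length := by omega
    have h32 : steps.length - 3 + 1 = steps.length - 2 := by omega
    have hdrop : steps.drop (steps.length - 3)
        = steps[steps.length - 3] :: steps.drop (steps.length - 2) := by
      rw [List.drop_eq_getElem_cons hlt, h32]
    have h2 : (steps.drop (steps.length - 2)).length = 2 := by
      rw [List.length_drop]; omega
    obtain ⟨a, b, hab⟩ := List.length_eq_two.mp h2
    rw [hdrop, hab]
    have e1 : PySem.Chars.join " | ".toList [a, b] = a ++ " | ".toList ++ b := by
      rw [PySem.Chars.join_cons_cons, PySem.Chars.join_singleton]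
    have e2 : PySem.Chars.join " | ".toList [steps[steps.length - 3], a, b]
        = steps[steps.length - 3] ++ " | ".toList ++ (a ++ " | ".toList ++ b) := by
      rw [PySem.Chars.join_cons_cons, e1]
    rw [e1, e2]
    simp only [List.length_append]
    have hsep : (0 : Nat) < " | ".toList.length := by decide
    omega
  · left
    have h1 : steps.length - 3 = steps.length - 2 := by omega
    rw [h1]

-- B's collected steps are exactly the 3-suffix of A's merged step list
lemma pv_steps_eq (messages : List String) :
    (pvBackB messages.reverse none none []).reverse
      = (messages.foldl pvFwd ([], none)).1.drop
          ((messages.foldl pvFwd ([], none)).1.length - 3) := by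
  induction messages using List.reverseRecOn with
  | nil => simp [pvBackB]
  | append_singleton ys m _ =>
    rw [List.reverse_append]
    simp only [List.reverse_singleton, List.singleton_append]
    have hstep : pvBackB (m :: ys.reverse) none none []
        = pvBackB ys.reverse (some (pvCharAt0 m)) (some (PySem.List.slice m.toList (some 2) none)) [] := by
      simp [pvBackB]
    rw [hstep, pvRuns_take ys.reverse _ _ [] (by simp)]
    simp only [List.nil_append]
    have hText : PySem.List.slice m.toList (some 2) none = pvText m := rfl
    rw [hText, pv_main ys (pvCharAt0 m) (pvText m)]
    have hF : pvAttach (ys.foldl pvFwd ([], none)) (pvCharAt0 m) (pvText m)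
        = ((ys ++ [m]).foldl pvFwd ([], none)).1 := by
      rw [List.foldl_append]
      simp [pvFwd]
    rw [hF, pv_take_rev]
    simp

-- ===== VERDICT (by name: the statement is the Claim_ definition above) =====
theorem constuct_interpreter_contexts_spec : Claim_equal_constuct_interpreter_contexts := by
  intro messages _ _
  unfold Spec_constuct_interpreter_contexts
  unfold constuct_interpreter_contexts constuct_interpreter_contexts_alt
  have hrange : PySem.List.pyRange 2 (2 + 2) 1 = [2, 3] := by decide
  have hfold := pv_fold_eq messages messages 0 [] (by simp)
  have hpv0 : pvPrevA messages ((0 : Nat) : Int) = none := by simp [pvPrevA]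
  rw [hpv0] at hfold
  simp only [List.map_id_fun', id, Nat.cast_zero] at hfold ⊢
  rw [hrange]
  simp only [List.foldl_cons, List.foldl_nil]
  rw [hfold]
  set S := (messages.foldl pvFwd ([], none)).1 with hS
  have hsteps : (pvBackB messages.reverse none none []).reverse = S.drop (S.length - 3) := by
    rw [pv_steps_eq messages]
  rw [hsteps]
  have hs2 : PySem.List.slice S (some (-2)) none = S.drop (S.length - 2) :=
    PySem.List.slice_from_neg_ofNat S 2 (by omega)
  have hs3 : PySem.List.slice S (some (-3)) none = S.drop (S.length - 3) :=
    PySem.List.slice_from_neg_ofNat S 3 (by omega)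
  have hs23 : PySem.List.slice (S.drop (S.length - 3)) (some (-2)) none = S.drop (S.length - 2) := by
    rw [PySem.List.slice_from_neg_ofNat _ 2 (by omega), List.drop_drop, List.length_drop]
    congr 1
    omega
  rw [hs2, hs3, hs23]
  set c2 := PySem.Chars.join " | ".toList (S.drop (S.length - 2)) with hc2
  set c3 := PySem.Chars.join " | ".toList (S.drop (S.length - 3)) with hc3
  rcases pv_sfx S with h | h
  · rw [← hc2, ← hc3] at h
    rw [if_pos h, h]
    have hadd : PySem.Set.add (PySem.Set.add PySem.Set.empty c2) c2 = [c2] := by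
      simp [PySem.Set.add, PySem.Set.empty]
    rw [hadd, PySem.List.sorted_eq_self_of_pairwise _ _ (List.pairwise_singleton _ _)]
    simp
  · rw [← hc2, ← hc3] at h
    have hne : ¬ (c3 = c2) := by
      intro he; rw [he] at h; omega
    rw [if_neg hne]
    have hadd : PySem.Set.add (PySem.Set.add PySem.Set.empty c2) c3 = [c2, c3] := by
      simp [PySem.Set.add, PySem.Set.empty, PySem.Set.contains, hne]
    rw [hadd]
    have hsorted : PySem.List.sorted [c2, c3] (fun s => -(PySem.List.len s)) = [c3, c2] := by
      refine PySem.List.sorted_eq_of_perm_of_pairwise_lt _ _ _ (List.Perm.swap _ _ _) ?_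
      refine List.Pairwise.cons ?_ (List.pairwise_singleton _ _)
      intro b hb
      rw [List.mem_singleton] at hb
      subst hb
      simp only [PySem.List.len_eq]
      omega
    rw [hsorted]
    simp
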